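-- pv_equiv track=rewrite | github.com/franAndrad/python-src | tps/tp2/tp2_v3.py | lenguaje
-- ===== SOURCE A (Python) =====
-- def lenguaje(palabra):
--     sE = False
--     sES = False
--     sP = False
--     sPT = False
--     for caracteres in palabra:
--         if caracteres == 'E':
--             sE = True
--         elif caracteres == 'S' and sE:
--             sES = True
--         else:
--             sE = False
--         if caracteres == 'P':
--             sP = True
--         elif caracteres == 'T' and sP:
--             sPT = True
--         else:
--             sP = False
--     if sES:
--         return 'Español'
--     elif sPT:
--         return 'Portugués'
-- ===== SOURCE B (Python) =====
-- def lenguaje(palabra):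
--     es = False
--     pt = False
--     for par in zip(palabra, palabra[1:]):
--         if par == ('E', 'S'):
--             es = True
--         elif par == ('P', 'T'):
--             pt = True
--     if es:
--         return 'Español'
--     elif pt:
--         return 'Portugués'
-- ===== Notes on version B (the rewrite author's own statement) =====
-- stated objective: simpler
-- what changed: Replaces the four-flag single-character state machine with a stateless scan over consecutive character pairs (zip(palabra, palabra[1:])) that just records whether the pair ('E','S') or ('P','T') occurs.
import Mathlib
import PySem

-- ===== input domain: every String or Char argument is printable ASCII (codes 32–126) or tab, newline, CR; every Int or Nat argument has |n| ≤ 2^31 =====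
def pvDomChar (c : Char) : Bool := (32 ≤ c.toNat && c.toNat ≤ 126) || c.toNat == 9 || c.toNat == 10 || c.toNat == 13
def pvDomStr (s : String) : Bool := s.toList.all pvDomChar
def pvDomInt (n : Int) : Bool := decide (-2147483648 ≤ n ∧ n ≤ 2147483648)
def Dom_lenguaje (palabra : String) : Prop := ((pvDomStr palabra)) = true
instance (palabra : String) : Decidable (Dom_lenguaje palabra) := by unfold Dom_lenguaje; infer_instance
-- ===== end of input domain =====

-- B replaces A's four-flag state machine by a stateless scan over consecutive
-- character pairs; objective: simpler (same O(n) cost).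

-- ===== PORT A =====
-- one iteration of A's loop body on the state (sE, sES, sP, sPT)
def lenguajeStep (s : Bool × Bool × Bool × Bool) (c : Char) : Bool × Bool × Bool × Bool :=
  let (sE, sES, sP, sPT) := s
  let (sE, sES) :=
    if c = 'E' then (true, sES)
    else if c = 'S' ∧ sE then (sE, true)
    else (false, sES)
  let (sP, sPT) :=
    if c = 'P' then (true, sPT)
    else if c = 'T' ∧ sP then (sP, true)
    else (false, sPT)
  (sE, sES, sP, sPT)

def lenguaje (palabra : String) : Option String :=
  let st := palabra.toList.foldl lenguajeStep (false, false, false, false)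
  if st.2.1 then some "Español"
  else if st.2.2.2 then some "Portugués"
  else none

-- ===== PORT B =====
def lenguajeAltStep (s : Bool × Bool) (par : Char × Char) : Bool × Bool :=
  if par = ('E', 'S') then (true, s.2)
  else if par = ('P', 'T') then (s.1, true)
  else s

def lenguaje_alt (palabra : String) : Option String :=
  let l := palabra.toList
  let st := (l.zip (l.drop 1)).foldl lenguajeAltStep (false, false)
  if st.1 then some "Español"
  else if st.2 then some "Portugués"
  else none

-- ===== PRECONDITION & SPEC =====
def Spec_lenguaje (palabra : String) (out : Option String) : Prop := out = lenguaje_alt palabra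
instance (palabra : String) (out : Option String) : Decidable (Spec_lenguaje palabra out) := by unfold Spec_lenguaje; infer_instance

-- ===== CLAIM (what is proved, stated in full; the proofs are below) =====
def Claim_equal_lenguaje : Prop := ∀ (palabra : String), Dom_lenguaje palabra → Spec_lenguaje palabra (lenguaje palabra)

-- ===== LEMMAS AND PROOFS =====

-- the "ES seen" component of A's fold, as a recursion carrying the sE flag
def aES (e : Bool) : List Char → Bool
  | [] => false
  | c :: rest => (e && decide (c = 'S')) || aES (decide (c = 'E') || (e && decide (c = 'S'))) rest

def aPT (p : Bool) : List Char → Bool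
  | [] => false
  | c :: rest => (p && decide (c = 'T')) || aPT (decide (c = 'P') || (p && decide (c = 'T'))) rest

theorem step_eval (e es p pt : Bool) (c : Char) :
    lenguajeStep (e, es, p, pt) c =
      (decide (c = 'E') || (e && decide (c = 'S')),
       es || (e && decide (c = 'S')),
       decide (c = 'P') || (p && decide (c = 'T')),
       pt || (p && decide (c = 'T'))) := by
  unfold lenguajeStep
  by_cases hE : c = 'E' <;> by_cases hS : c = 'S' <;>
    by_cases hP : c = 'P' <;> by_cases hT : c = 'T' <;>
    simp_all <;> cases e <;> cases p <;> simp

theorem foldA_ES (l : List Char) : ∀ e es p pt : Bool,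
    (l.foldl lenguajeStep (e, es, p, pt)).2.1 = (es || aES e l) := by
  induction l with
  | nil => intro e es p pt; simp [aES]
  | cons c rest ih =>
    intro e es p pt
    simp only [List.foldl_cons, step_eval, aES, ih, Bool.or_assoc]

theorem foldA_PT (l : List Char) : ∀ e es p pt : Bool,
    (l.foldl lenguajeStep (e, es, p, pt)).2.2.2 = (pt || aPT p l) := by
  induction l with
  | nil => intro e es p pt; simp [aPT]
  | cons c rest ih =>
    intro e es p pt
    simp only [List.foldl_cons, step_eval, aPT, ih, Bool.or_assoc]

theorem foldB_char (pr : List (Char × Char)) : ∀ es pt : Bool,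
    pr.foldl lenguajeAltStep (es, pt) =
      (es || pr.any (fun q => decide (q = ('E', 'S'))),
       pt || pr.any (fun q => decide (q = ('P', 'T')))) := by
  induction pr with
  | nil => intro es pt; simp
  | cons q rest ih =>
    intro es pt
    simp only [List.foldl_cons, List.any_cons]
    by_cases h1 : q = ('E', 'S')
    · simp [lenguajeAltStep, h1, ih]
    · by_cases h2 : q = ('P', 'T') <;> simp [lenguajeAltStep, h1, h2, ih]

-- bridge: A's recursive ES detector equals B's pairwise-any, relating the
-- carried flag to the head character
def headIs (c : Char) : List Char → Bool
  | [] => false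
  | d :: _ => decide (d = c)

theorem aES_eq (l : List Char) : ∀ e : Bool,
    aES e l = ((e && headIs 'S' l) || (l.zip (l.drop 1)).any (fun q => decide (q = ('E', 'S')))) := by
  induction l with
  | nil => intro e; simp [aES, headIs]
  | cons c rest ih =>
    intro e
    simp only [aES, ih, List.drop_one]
    cases rest with
    | nil => simp [headIs]
    | cons d r2 =>
      simp only [List.tail_cons, List.zip_cons_cons, List.any_cons, headIs, Prod.mk.injEq]
      by_cases hS : c = 'S' <;> by_cases hE : c = 'E' <;> by_cases hd : d = 'S' <;>
        simp_all

theorem aPT_eq (l : List Char) : ∀ p : Bool,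
    aPT p l = ((p && headIs 'T' l) || (l.zip (l.drop 1)).any (fun q => decide (q = ('P', 'T')))) := by
  induction l with
  | nil => intro p; simp [aPT, headIs]
  | cons c rest ih =>
    intro p
    simp only [aPT, ih, List.drop_one]
    cases rest with
    | nil => simp [headIs]
    | cons d r2 =>
      simp only [List.tail_cons, List.zip_cons_cons, List.any_cons, headIs, Prod.mk.injEq]
      by_cases hT : c = 'T' <;> by_cases hP : c = 'P' <;> by_cases hd : d = 'T' <;>
        simp_all

-- ===== VERDICT (by name: the statement is the Claim_ definition above) =====
theorem lenguaje_spec : Claim_equal_lenguaje := by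
  intro palabra _
  show lenguaje palabra = lenguaje_alt palabra
  simp only [lenguaje, lenguaje_alt, foldA_ES, foldA_PT, foldB_char, aES_eq, aPT_eq,
    Bool.false_or, Bool.false_and]
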